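-- pv_equiv track=rewrite | github.com/sunjae0902/backjoon | 프로그래머스/4/17685. ［3차］ 자동완성/［3차］ 자동완성.py | solution
-- ===== SOURCE A (Python) =====
-- def solution(words):
--     trie = {}
--     answer = 0
--
--     for word in words:
--         node = trie
--         for char in word:
--             if char not in node:
--                 node[char] = {"#": 0}
--             node = node[char]
--             node["#"] += 1
--
--     for word in words:
--         node = trie
--         for i, char in enumerate(word):
--             node = node[char]
--             if node["#"] == 1:
--                 answer += i + 1
--                 break
--         else:
--             answer += len(word)
--
--     return answer
-- ===== SOURCE B (Python) =====
-- def lcp(a, b):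
--     if a and b and a[0] == b[0]:
--         return 1 + lcp(a[1:], b[1:])
--     return 0
--
--
-- def solution(words):
--     total = 0
--     for i, w in enumerate(words):
--         best = 0
--         for j, x in enumerate(words):
--             if j != i:
--                 best = max(best, lcp(w, x))
--         total += min(len(w), best + 1)
--     return total
-- ===== Notes on version B (the rewrite author's own statement) =====
-- stated objective: simpler
-- what changed: Replaces the nested-dict trie construction and per-word trie walk by a direct pairwise longest-common-prefix computation: each word contributes min(len(word), 1 + max LCP with any other word).
import Mathlib
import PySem

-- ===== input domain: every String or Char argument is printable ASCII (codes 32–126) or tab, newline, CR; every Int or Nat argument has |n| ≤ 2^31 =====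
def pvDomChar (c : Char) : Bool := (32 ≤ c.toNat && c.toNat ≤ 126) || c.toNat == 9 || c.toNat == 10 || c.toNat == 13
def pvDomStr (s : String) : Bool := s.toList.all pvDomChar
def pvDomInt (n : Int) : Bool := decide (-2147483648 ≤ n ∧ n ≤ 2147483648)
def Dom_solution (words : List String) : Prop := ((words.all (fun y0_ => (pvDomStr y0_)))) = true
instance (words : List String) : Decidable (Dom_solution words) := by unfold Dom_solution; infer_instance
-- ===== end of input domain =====

-- B replaces A's nested-dict trie (build + per-word count walk) by a direct pairwise
-- longest-common-prefix scan: each word contributes min(len w, 1 + max LCP with any other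
-- word). Objective: simpler (no trie data structure).

-- ===== PORT A =====
-- A's trie is a dict-of-dicts where each child node carries a "#" count key. We model a
-- children dict as an assoc list in insertion order; the "#" count rides on each entry
-- (cons key count subtree siblings). This is exact on Pre_solution (no word contains '#'
-- past position 0), where the count key never collides with a character key.
inductive PChildren where
  | nil : PChildren
  | cons : Char → Int → PChildren → PChildren → PChildren
deriving DecidableEq, Repr

-- node[char] (dict lookup, first match)
def lookupC : PChildren → Char → Option (Int × PChildren)
  | .nil, _ => none
  | .cons c n sub rest, k => if c = k then some (n, sub) else lookupC rest k

-- node[char] = value (overwrite in place, else append)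
def setC : PChildren → Char → Int → PChildren → PChildren
  | .nil, k, n, v => .cons k n v .nil
  | .cons c m s rest, k, n, v =>
      if c = k then .cons c n v rest else .cons c m s (setC rest k n v)

-- A's inner insert loop: "if char not in node: node[char] = {'#': 0}; node = node[char]; node['#'] += 1"
def insertWord : PChildren → List Char → PChildren
  | t, [] => t
  | t, c :: cs =>
    match lookupC t c with
    | none => setC t c 1 (insertWord .nil cs)
    | some (n, sub) => setC t c (n + 1) (insertWord sub cs)

-- A's second loop body: walk the trie, stop at the first node whose count is 1
def queryGo : PChildren → List Char → Int → Int → Int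
  | _, [], _, len => len
  | t, c :: rest, i, len =>
    match lookupC t c with
    | none => 0  -- KeyError in Python; unreachable here: every queried word was inserted first
    | some (n, sub) => if n = 1 then i + 1 else queryGo sub rest (i + 1) len

def solution (words : List String) : Int :=
  let trie := words.foldl (fun t w => insertWord t w.toList) .nil
  words.foldl (fun answer w => answer + queryGo trie w.toList 0 (PySem.Str.len w)) 0

-- ===== PORT B =====
-- lcp(a, b) from Source B (recursion on the string viewed as its character list)
def lcpL : List Char → List Char → Int
  | a :: as_, b :: bs => if a = b then 1 + lcpL as_ bs else 0
  | _, _ => 0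

def solution_alt (words : List String) : Int :=
  (PySem.List.enumerate words 0).foldl
    (fun total iw =>
      total + min (PySem.Str.len iw.2)
        ((PySem.List.enumerate words 0).foldl
          (fun best jx =>
            if jx.1 ≠ iw.1 then max best (lcpL iw.2.toList jx.2.toList) else best) 0 + 1)) 0

-- ===== PRECONDITION & SPEC =====
-- Pre_ excludes exactly the inputs on which A raises TypeError: a word with '#' at some
-- position ≥ 1 reaches a node whose '#' entry is the int count, which A then subscripts.
def Pre_solution (words : List String) : Prop :=
  ∀ w ∈ words, '#' ∉ w.toList.drop 1
instance (words : List String) : Decidable (Pre_solution words) := by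
  unfold Pre_solution; infer_instance

def pvWitness_solution : List String := ["go", "gone", "guild"]

def Spec_solution (words : List String) (out : Int) : Prop := out = solution_alt words
instance (words : List String) (out : Int) : Decidable (Spec_solution words out) := by
  unfold Spec_solution; infer_instance

-- ===== CLAIM (what is proved, stated in full; the proofs are below) =====
def Claim_equal_solution : Prop :=
  ∀ (words : List String), Dom_solution words → Pre_solution words →
    Spec_solution words (solution words)

-- ===== LEMMAS AND PROOFS =====

-- node at the (nonempty) path c :: cs from a children dict
def nodeAt : PChildren → Char → List Char → Option (Int × PChildren)
  | t, c, cs =>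
    match lookupC t c with
    | none => none
    | some (n, sub) =>
      match cs with
      | [] => some (n, sub)
      | c' :: cs' => nodeAt sub c' cs'

def optNodeAtL (t : PChildren) : List Char → Option (Int × PChildren)
  | [] => none
  | c :: cs => nodeAt t c cs

def cntAtL (t : PChildren) (p : List Char) : Int :=
  match optNodeAtL t p with
  | none => 0
  | some (n, _) => n

def subAtL (t : PChildren) : List Char → PChildren
  | [] => t
  | c :: cs =>
    match nodeAt t c cs with
    | none => .nil
    | some (_, s) => s

theorem lookup_set (t : PChildren) (k c : Char) (n : Int) (v : PChildren) :
    lookupC (setC t k n v) c = if k = c then some (n, v) else lookupC t c := by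
  induction t with
  | nil =>
    by_cases h : k = c <;> simp [setC, lookupC, h]
  | cons c' m s rest ih1 ih2 =>
    simp only [setC]
    by_cases h1 : c' = k
    · subst h1
      by_cases h2 : c' = c <;> simp [lookupC, h2]
    · by_cases h2 : c' = c
      · subst h2
        have hk : ¬ (k = c') := fun h => h1 h.symm
        simp [lookupC, h1, hk]
      · simp [lookupC, h1, h2, ih2]

theorem nodeAt_none {t : PChildren} {c : Char} (cs : List Char)
    (h : lookupC t c = none) : nodeAt t c cs = none := by
  unfold nodeAt; rw [h]

theorem nodeAt_some_nil {t : PChildren} {c : Char} {n : Int} {sub : PChildren}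
    (h : lookupC t c = some (n, sub)) : nodeAt t c [] = some (n, sub) := by
  unfold nodeAt; rw [h]

theorem nodeAt_some_cons {t : PChildren} {c : Char} {n : Int} {sub : PChildren}
    (c' : Char) (cs' : List Char)
    (h : lookupC t c = some (n, sub)) : nodeAt t c (c' :: cs') = nodeAt sub c' cs' := by
  conv_lhs => unfold nodeAt
  rw [h]

theorem cntAtL_nil (c' : Char) (p' : List Char) : cntAtL .nil (c' :: p') = 0 := by
  have h : lookupC PChildren.nil c' = none := rfl
  simp [cntAtL, optNodeAtL, nodeAt_none p' h]

theorem cntAtL_single_none {t : PChildren} {c : Char} (h : lookupC t c = none) :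
    cntAtL t [c] = 0 := by
  simp [cntAtL, optNodeAtL, nodeAt_none ([] : List Char) h]

theorem cntAtL_single_some {t : PChildren} {c : Char} {n : Int} {sub : PChildren}
    (h : lookupC t c = some (n, sub)) : cntAtL t [c] = n := by
  simp [cntAtL, optNodeAtL, nodeAt_some_nil h]

theorem cntAtL_cons_none {t : PChildren} {c : Char} (c' : Char) (p' : List Char)
    (h : lookupC t c = none) : cntAtL t (c :: c' :: p') = 0 := by
  simp [cntAtL, optNodeAtL, nodeAt_none (c' :: p') h]

theorem cntAtL_cons_some {t : PChildren} {c : Char} {n : Int} {sub : PChildren}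
    (c' : Char) (p' : List Char) (h : lookupC t c = some (n, sub)) :
    cntAtL t (c :: c' :: p') = cntAtL sub (c' :: p') := by
  simp [cntAtL, optNodeAtL, nodeAt_some_cons c' p' h]

theorem cnt_insert (cs : List Char) (t : PChildren) (c : Char) (p : List Char) :
    cntAtL (insertWord t cs) (c :: p) =
      cntAtL t (c :: p) + (if (c :: p) <+: cs then 1 else 0) := by
  induction cs generalizing t c p with
  | nil => simp [insertWord]
  | cons d cs' ih =>
    by_cases hcd : c = d
    · subst hcd
      rcases h : lookupC t c with _ | ⟨n, sub⟩
      · simp only [insertWord, h]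
        have hl : lookupC (setC t c 1 (insertWord .nil cs')) c =
            some (1, insertWord .nil cs') := by rw [lookup_set]; simp
        cases p with
        | nil =>
          rw [cntAtL_single_some hl, cntAtL_single_none h]
          simp [List.cons_prefix_cons]
        | cons c' p' =>
          rw [cntAtL_cons_some c' p' hl, cntAtL_cons_none c' p' h, ih, cntAtL_nil]
          simp [List.cons_prefix_cons]
      · simp only [insertWord, h]
        have hl : lookupC (setC t c (n + 1) (insertWord sub cs')) c =
            some (n + 1, insertWord sub cs') := by rw [lookup_set]; simp
        cases p with
        | nil =>
          rw [cntAtL_single_some hl, cntAtL_single_some h]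
          simp [List.cons_prefix_cons]
        | cons c' p' =>
          rw [cntAtL_cons_some c' p' hl, cntAtL_cons_some c' p' h, ih]
          simp [List.cons_prefix_cons]
    · have hne : d ≠ c := fun h => hcd h.symm
      have hpre : ¬ ((c :: p) <+: (d :: cs')) := by
        simp [List.cons_prefix_cons, hcd]
      have key : ∀ (N : Int) (V : PChildren),
          cntAtL (setC t d N V) (c :: p) = cntAtL t (c :: p) := by
        intro N V
        have hl : lookupC (setC t d N V) c = lookupC t c := by
          rw [lookup_set]; simp [hne]
        simp only [cntAtL, optNodeAtL]
        conv_lhs => unfold nodeAt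
        conv_rhs => unfold nodeAt
        rw [hl]
      rcases h : lookupC t d with _ | ⟨n, sub⟩ <;>
        simp only [insertWord, h, key, hpre, if_false, add_zero]

theorem cnt_build (ws : List String) (t : PChildren) (c : Char) (p : List Char) :
    cntAtL (ws.foldl (fun a w => insertWord a w.toList) t) (c :: p) =
      cntAtL t (c :: p) + (ws.countP (fun w => decide ((c :: p) <+: w.toList)) : Int) := by
  induction ws generalizing t with
  | nil => simp
  | cons w ws ih =>
    simp only [List.foldl_cons, ih, cnt_insert, List.countP_cons]
    by_cases h : (c :: p) <+: w.toList <;> simp [h] <;> ring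

theorem nodeAt_append_one (pre : List Char) (t : PChildren) (c : Char) :
    optNodeAtL t (pre ++ [c]) = lookupC (subAtL t pre) c := by
  induction pre generalizing t with
  | nil =>
    simp only [List.nil_append, optNodeAtL, subAtL]
    unfold nodeAt
    rcases h : lookupC t c with _ | ⟨n, sub⟩ <;> simp
  | cons d pre' ih =>
    simp only [List.cons_append, optNodeAtL, subAtL]
    cases pre' with
    | nil =>
      simp only [List.nil_append]
      rcases h : lookupC t d with _ | ⟨n, sub⟩
      · rw [nodeAt_none [c] h]
        have : nodeAt t d [] = none := nodeAt_none [] h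
        rw [this]
        rfl
      · rw [nodeAt_some_cons c [] h]
        have : nodeAt t d [] = some (n, sub) := nodeAt_some_nil h
        rw [this]
        unfold nodeAt
        rcases h2 : lookupC sub c with _ | ⟨m, s2⟩ <;> simp
    | cons e pre'' =>
      simp only [List.cons_append]
      rcases h : lookupC t d with _ | ⟨n, sub⟩
      · rw [nodeAt_none (e :: (pre'' ++ [c])) h]
        have : nodeAt t d (e :: pre'') = none := nodeAt_none _ h
        rw [this]
        rfl
      · rw [nodeAt_some_cons e (pre'' ++ [c]) h]
        have h2 : nodeAt t d (e :: pre'') = nodeAt sub e pre'' := nodeAt_some_cons e pre'' h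
        rw [h2]
        have := ih (t := sub)
        simp only [optNodeAtL, subAtL] at this
        exact this

theorem lcpL_nonneg (a b : List Char) : 0 ≤ lcpL a b := by
  induction a generalizing b with
  | nil => simp [lcpL]
  | cons x xs ih =>
    cases b with
    | nil => simp [lcpL]
    | cons y ys =>
      simp only [lcpL]
      split_ifs
      · have := ih ys; omega
      · omega

theorem lcp_ge_iff (m : Nat) (a b : List Char) (hm : m ≤ a.length) :
    ((m : Int) ≤ lcpL a b ↔ a.take m <+: b) := by
  induction m generalizing a b with
  | zero => simpa using lcpL_nonneg a b
  | succ m' ih =>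
    cases a with
    | nil => simp at hm
    | cons x xs =>
      cases b with
      | nil =>
        simp only [lcpL, List.take_succ_cons]
        constructor
        · intro h; omega
        · intro h; simp [List.prefix_nil] at h
      | cons y ys =>
        simp only [lcpL, List.take_succ_cons, List.cons_prefix_cons]
        split_ifs with hxy
        · subst hxy
          have := ih xs ys (by simpa using hm)
          constructor
          · intro h; exact ⟨rfl, this.mp (by omega)⟩
          · intro ⟨_, h2⟩; have := this.mpr h2; omega
        · constructor
          · intro h; omega
          · intro ⟨h1, _⟩; exact absurd h1 hxy

theorem foldl_max_lt (xs : List Int) (a m : Int) :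
    List.foldl max a xs < m ↔ a < m ∧ ∀ x ∈ xs, x < m := by
  induction xs generalizing a with
  | nil => simp
  | cons x xs ih =>
    simp only [List.foldl_cons, ih, max_lt_iff, List.mem_cons]
    constructor
    · intro ⟨⟨h1, h2⟩, h3⟩; exact ⟨h1, fun y hy => hy.elim (fun e => e ▸ h2) (h3 y)⟩
    · intro ⟨h1, h2⟩; exact ⟨⟨h1, h2 x (.inl rfl)⟩, fun y hy => h2 y (.inr hy)⟩

def trieT (ws : List String) : PChildren :=
  ws.foldl (fun t w => insertWord t w.toList) .nil

def maxlcp (W : List Char) (xs : List String) : Int :=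
  xs.foldl (fun acc x => max acc (lcpL W x.toList)) 0

theorem cntAtL_eq_of_opt {t : PChildren} {p : List Char} {n : Int} {s : PChildren}
    (h : optNodeAtL t p = some (n, s)) : cntAtL t p = n := by
  simp [cntAtL, h]

theorem cntAtL_eq_zero_of_opt_none {t : PChildren} {p : List Char}
    (h : optNodeAtL t p = none) : cntAtL t p = 0 := by
  simp [cntAtL, h]

theorem subAtL_of_optNodeAt {t : PChildren} {p : List Char} {n : Int} {s : PChildren}
    (hp : p ≠ []) (h : optNodeAtL t p = some (n, s)) : subAtL t p = s := by
  cases p with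
  | nil => exact absurd rfl hp
  | cons c cs =>
    simp only [optNodeAtL] at h
    simp [subAtL, h]

theorem cntAtL_build (ws : List String) (p : List Char) (hp : p ≠ []) :
    cntAtL (trieT ws) p = (ws.countP (fun w => decide (p <+: w.toList)) : Int) := by
  cases p with
  | nil => exact absurd rfl hp
  | cons c cs =>
    have := cnt_build ws .nil c cs
    rw [trieT, this, cntAtL_nil, zero_add]

theorem foldl_max_init_le (xs : List Int) (a : Int) : a ≤ xs.foldl max a := by
  induction xs generalizing a with
  | nil => simp
  | cons x xs ih => exact le_trans (le_max_left a x) (ih _)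

theorem foldl_maxf_eq (f : String → Int) (xs : List String) (a : Int) :
    xs.foldl (fun acc x => max acc (f x)) a = (xs.map f).foldl max a := by
  induction xs generalizing a with
  | nil => rfl
  | cons x xs ih => simp [ih]

theorem maxlcp_nonneg (W : List Char) (xs : List String) : 0 ≤ maxlcp W xs := by
  rw [maxlcp, foldl_maxf_eq]
  exact foldl_max_init_le _ 0

theorem maxlcp_lt_iff (W : List Char) (xs : List String) (m : Int) :
    maxlcp W xs < m ↔ 0 < m ∧ ∀ x ∈ xs, lcpL W x.toList < m := by
  rw [maxlcp, foldl_maxf_eq, foldl_max_lt]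
  simp

theorem queryGo_nil (t : PChildren) (i len : Int) : queryGo t [] i len = len := rfl

theorem queryGo_cons (t : PChildren) (c : Char) (rest : List Char) (i len : Int) :
    queryGo t (c :: rest) i len =
      match lookupC t c with
      | none => 0
      | some (n, sub) => if n = 1 then i + 1 else queryGo sub rest (i + 1) len := rfl

theorem queryGo_spec (ws u v : List String) (w : String) (hws : ws = u ++ w :: v) :
    ∀ (rest pre : List Char), pre ++ rest = w.toList →
      (pre.length : Int) ≤ maxlcp w.toList (u ++ v) →
      queryGo (subAtL (trieT ws) pre) rest (pre.length : Int) ((w.toList.length : Int)) =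
        min ((w.toList.length : Int)) (maxlcp w.toList (u ++ v) + 1) := by
  intro rest
  induction rest with
  | nil =>
    intro pre hpre hb
    simp only [List.append_nil] at hpre
    subst hpre
    simp only [queryGo_nil]
    omega
  | cons c rest' ih =>
    intro pre hpre hb
    have hm_le : pre.length + 1 ≤ w.toList.length := by
      have := congrArg List.length hpre
      rw [List.length_append, List.length_cons] at this
      omega
    have htake : w.toList.take (pre.length + 1) = pre ++ [c] := by
      rw [← hpre, List.take_append]
      simp
    have hpne : (pre ++ [c]) ≠ ([] : List Char) := by simp
    have hw : (pre ++ [c]) <+: w.toList := htake ▸ List.take_prefix _ _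
    have hcnt : cntAtL (trieT ws) (pre ++ [c]) =
        ((u ++ v).countP
          (fun x => decide (((pre.length + 1 : Nat) : Int) ≤ lcpL w.toList x.toList)) : Int) + 1 := by
      rw [cntAtL_build ws _ hpne, hws]
      have hx : ∀ x : String, (decide ((pre ++ [c]) <+: x.toList)) =
          (decide (((pre.length + 1 : Nat) : Int) ≤ lcpL w.toList x.toList)) := by
        intro x
        have h := lcp_ge_iff (pre.length + 1) w.toList x.toList hm_le
        rw [htake] at h
        exact decide_eq_decide.mpr h.symm
      have hfun : (fun x : String => decide ((pre ++ [c]) <+: x.toList)) =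
          (fun x : String => decide (((pre.length + 1 : Nat) : Int) ≤ lcpL w.toList x.toList)) :=
        funext hx
      have hww : (decide (((pre.length + 1 : Nat) : Int) ≤ lcpL w.toList w.toList)) = true := by
        have h := lcp_ge_iff (pre.length + 1) w.toList w.toList hm_le
        rw [htake] at h
        simpa using h.mpr hw
      rw [List.countP_append, List.countP_cons, hfun, hx w, List.countP_append]
      simp only [hww, if_true]
      push_cast
      ring
    rw [queryGo_cons]
    rw [show lookupC (subAtL (trieT ws) pre) c = optNodeAtL (trieT ws) (pre ++ [c]) from
      (nodeAt_append_one pre (trieT ws) c).symm]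
    by_cases hcase : maxlcp w.toList (u ++ v) ≤ (pre.length : Int)
    · -- the count here is 1: A stops, having typed pre.length + 1 characters
      have hK : (u ++ v).countP
          (fun x => decide (((pre.length + 1 : Nat) : Int) ≤ lcpL w.toList x.toList)) = 0 := by
        apply List.countP_eq_zero.mpr
        intro x hxmem
        have hlt := (maxlcp_lt_iff w.toList (u ++ v) ((pre.length + 1 : Nat) : Int)).mp
          (by push_cast; omega)
        have h6 := hlt.2 x hxmem
        simp only [decide_eq_true_eq]
        omega
      rcases hopt : optNodeAtL (trieT ws) (pre ++ [c]) with _ | ⟨n₀, s₀⟩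
      · rw [cntAtL_eq_zero_of_opt_none hopt, hK] at hcnt
        simp at hcnt
      · have hn : n₀ = 1 := by
          rw [cntAtL_eq_of_opt hopt, hK] at hcnt
          simpa using hcnt
        simp only [hn, if_pos]
        have hbe : maxlcp w.toList (u ++ v) = (pre.length : Int) := le_antisymm hcase hb
        rw [hbe, min_eq_right (by omega)]
    · -- another word shares this prefix: the count is ≥ 2, A walks on
      have hKpos : 0 < (u ++ v).countP
          (fun x => decide (((pre.length + 1 : Nat) : Int) ≤ lcpL w.toList x.toList)) := by
        rcases Nat.eq_zero_or_pos ((u ++ v).countP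
          (fun x => decide (((pre.length + 1 : Nat) : Int) ≤ lcpL w.toList x.toList))) with hz | hp
        · exfalso
          have hall := List.countP_eq_zero.mp hz
          have hblt : maxlcp w.toList (u ++ v) < ((pre.length + 1 : Nat) : Int) := by
            apply (maxlcp_lt_iff _ _ _).mpr
            refine ⟨by push_cast; omega, fun x hxmem => ?_⟩
            have h5 := hall x hxmem
            simp only [decide_eq_true_eq] at h5
            omega
          push_cast at hblt
          omega
        · exact hp
      rcases hopt : optNodeAtL (trieT ws) (pre ++ [c]) with _ | ⟨n₀, s₀⟩
      · rw [cntAtL_eq_zero_of_opt_none hopt] at hcnt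
        omega
      · have hn : n₀ ≠ 1 := by
          rw [cntAtL_eq_of_opt hopt] at hcnt
          omega
        simp only [hn, if_false]
        rw [← subAtL_of_optNodeAt hpne hopt]
        have hih := ih (pre ++ [c]) (by simpa using hpre)
          (by simp only [List.length_append, List.length_cons, List.length_nil]; push_cast; omega)
        have hlen : (((pre ++ [c]).length : Nat) : Int) = (pre.length : Int) + 1 := by
          simp
        rw [hlen] at hih
        exact hih

theorem foldl_enum_max (W : List Char) (i : Int) (xs : List String) :
    ∀ (s acc : Int), (∀ p ∈ PySem.List.enumerate xs s, p.1 ≠ i) →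
      (PySem.List.enumerate xs s).foldl
          (fun best jx => if jx.1 ≠ i then max best (lcpL W jx.2.toList) else best) acc =
        xs.foldl (fun best x => max best (lcpL W x.toList)) acc := by
  induction xs with
  | nil => intro s acc h; simp [PySem.List.enumerate_nil]
  | cons x xs ih =>
    intro s acc h
    rw [PySem.List.enumerate_cons]
    simp only [List.foldl_cons]
    rw [if_pos (h _ (List.mem_cons_self))]
    exact ih (s + 1) _ (fun p hp => h p (List.mem_cons_of_mem _ hp))

theorem inner_eq (W : List Char) (u v : List String) (w : String) (i : Int)
    (hi : i = (u.length : Int)) :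
    (PySem.List.enumerate (u ++ w :: v) 0).foldl
        (fun best jx => if jx.1 ≠ i then max best (lcpL W jx.2.toList) else best) 0 =
      maxlcp W (u ++ v) := by
  subst hi
  rw [PySem.List.enumerate_append, List.foldl_append]
  have hu : ∀ p ∈ PySem.List.enumerate u 0, p.1 ≠ (u.length : Int) := by
    intro p hp
    rcases (PySem.List.mem_enumerate_iff _ _ _).mp hp with ⟨kk, hkk, rfl⟩
    simp only []
    omega
  rw [foldl_enum_max W _ u 0 0 hu, PySem.List.enumerate_cons]
  simp only [List.foldl_cons]
  rw [if_neg (by omega)]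
  have hv : ∀ p ∈ PySem.List.enumerate v (0 + (u.length : Int) + 1), p.1 ≠ (u.length : Int) := by
    intro p hp
    rcases (PySem.List.mem_enumerate_iff _ _ _).mp hp with ⟨kk, hkk, rfl⟩
    simp only []
    omega
  rw [foldl_enum_max W _ v _ _ hv, maxlcp, List.foldl_append]

theorem perWord (ws : List String) (k : Nat) (hk : k < ws.length) :
    queryGo (trieT ws) ws[k].toList 0 ((ws[k].toList.length : Int)) =
      min ((ws[k].toList.length : Int)) (maxlcp ws[k].toList (ws.take k ++ ws.drop (k + 1)) + 1) := by
  have hws : ws = ws.take k ++ ws[k] :: ws.drop (k + 1) := by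
    conv_lhs => rw [← List.take_append_drop k ws]
    rw [List.drop_eq_getElem_cons hk]
  have h0 := queryGo_spec ws (ws.take k) (ws.drop (k + 1)) ws[k] hws ws[k].toList []
    (by simp) (by simpa using maxlcp_nonneg _ _)
  simpa [subAtL] using h0

theorem solution_eq (ws : List String) : solution ws = solution_alt ws := by
  have hA : solution ws =
      ws.foldl (fun answer w => answer + queryGo (trieT ws) w.toList 0 (PySem.Str.len w)) 0 := rfl
  rw [hA, PySem.List.foldl_add
    (g := fun w => queryGo (trieT ws) w.toList 0 (PySem.Str.len w)),
    solution_alt, PySem.List.foldl_add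
    (g := fun iw : Int × String => min (PySem.Str.len iw.2)
      ((PySem.List.enumerate ws 0).foldl
        (fun best jx => if jx.1 ≠ iw.1 then max best (lcpL iw.2.toList jx.2.toList) else best) 0 + 1))]
  congr 1
  apply congrArg
  apply List.ext_getElem
  · simp [PySem.List.length_enumerate]
  · intro k hk1 hk2
    have hk : k < ws.length := by simpa using hk1
    simp only [List.getElem_map, PySem.List.getElem_enumerate]
    have hinner := inner_eq ws[k].toList (ws.take k) (ws.drop (k + 1)) ws[k]
      ((0 : Int) + (k : Int)) (by simp [List.length_take, Nat.min_eq_left hk.le])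
    rw [← List.drop_eq_getElem_cons hk, List.take_append_drop] at hinner
    rw [hinner]
    have hlen : PySem.Str.len ws[k] = ((ws[k].toList.length : Int)) := by
      simp [PySem.Str.len_eq]
    rw [hlen]
    exact perWord ws k hk

-- ===== VERDICT (by name: the statement is the Claim_ definition above) =====
theorem solution_spec : Claim_equal_solution := by
  intro words _ _
  exact solution_eq words
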